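-- pv_equiv track=rewrite | github.com/AdrianSuliga/WDI | Kolokwia/ex_A2_22-23.py | areTheyInSeq
-- ===== SOURCE A (Python) =====
-- def areTheyInSeq(a, b):
--     # 6, 9
--     seqL, seqM, seqR = 1, 2, 2
--     while True:
--         if seqM == b and seqL == a: return True
--         seqL = seqM
--         seqM = seqR
--         seqR = seqL + seqM - 1
--         if seqL > a: return False
-- ===== SOURCE B (Python) =====
-- def areTheyInSeq(a, b):
--     # Each sequence value is a Fibonacci number plus 1, so (a, b) are
--     # consecutive members iff (a-1, b-1) is a consecutive Fibonacci pair,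
--     # characterized by the closed-form identity |y^2 - x*y - x^2| = 1.
--     x, y = a - 1, b - 1
--     return 0 <= x <= y and (y * y - x * y - x * x) ** 2 == 1
-- ===== Notes on version B (the rewrite author's own statement) =====
-- stated objective: alternative
-- what changed: Replaces the iterative recurrence walk (values are Fibonacci+1) by the closed-form consecutive-Fibonacci test |y^2-xy-x^2|=1 on (a-1,b-1), with no loop at all.
import Mathlib
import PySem

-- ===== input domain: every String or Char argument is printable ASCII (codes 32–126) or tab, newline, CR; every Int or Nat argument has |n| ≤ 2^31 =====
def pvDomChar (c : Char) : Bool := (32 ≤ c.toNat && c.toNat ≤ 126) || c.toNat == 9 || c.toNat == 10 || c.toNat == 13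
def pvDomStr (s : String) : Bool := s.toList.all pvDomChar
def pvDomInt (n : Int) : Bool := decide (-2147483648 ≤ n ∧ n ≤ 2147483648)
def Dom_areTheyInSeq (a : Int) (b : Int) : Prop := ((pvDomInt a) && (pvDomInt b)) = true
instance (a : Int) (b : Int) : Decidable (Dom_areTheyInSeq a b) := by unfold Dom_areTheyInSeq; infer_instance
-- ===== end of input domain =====

-- B replaces A's recurrence loop by a closed-form consecutive-Fibonacci test; equal on all inputs.

-- ===== PORT A =====
-- A's `while True` loop, fuel-based for totality; the fuel a.toNat + 4 is proved
-- sufficient below (the loop exits once seqL > a and seqL grows at least linearly).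
def loopA (a b : Int) (L M R : Int) : Nat → Bool
  | 0 => false
  | fuel + 1 =>
    if M = b ∧ L = a then true
    else
      -- seqL, seqM, seqR := seqM, seqR, seqM + seqR - 1
      if M > a then false else loopA a b M R (M + R - 1) fuel

def areTheyInSeq (a : Int) (b : Int) : Bool :=
  loopA a b 1 2 2 (a.toNat + 4)

-- ===== PORT B =====
def areTheyInSeq_alt (a : Int) (b : Int) : Bool :=
  let x := a - 1
  let y := b - 1
  decide (0 ≤ x) && decide (x ≤ y) && decide ((y * y - x * y - x * x) ^ 2 = 1)

-- ===== PRECONDITION & SPEC =====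
def Spec_areTheyInSeq (a : Int) (b : Int) (out : Bool) : Prop := out = areTheyInSeq_alt a b
instance (a : Int) (b : Int) (out : Bool) : Decidable (Spec_areTheyInSeq a b out) := by unfold Spec_areTheyInSeq; infer_instance

-- ===== CLAIM (what is proved, stated in full; the proofs are below) =====
def Claim_equal_areTheyInSeq : Prop := ∀ (a : Int) (b : Int), Dom_areTheyInSeq a b → Spec_areTheyInSeq a b (areTheyInSeq a b)

-- ===== LEMMAS AND PROOFS =====

-- the sequence A walks: s j = fib j + 1  (1, 2, 2, 3, 4, 6, 9, …)
def pvSeq (j : Nat) : Int := (Nat.fib j : Int) + 1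

theorem pvSeq_step (k : Nat) : pvSeq (k+1) + pvSeq (k+2) - 1 = pvSeq (k+3) := by
  simp [pvSeq, Nat.fib_add_two (n := k+1)]
  ring

theorem loopA_sound : ∀ (fuel k : Nat) (a b : Int),
    loopA a b (pvSeq k) (pvSeq (k+1)) (pvSeq (k+2)) fuel = true →
    ∃ n, a = pvSeq n ∧ b = pvSeq (n+1) := by
  intro fuel
  induction fuel with
  | zero => intro k a b h; simp [loopA] at h
  | succ m ih =>
    intro k a b h
    rw [loopA] at h
    split at h
    · exact ⟨k, by tauto⟩
    · split at h
      · simp at h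
      · have := ih (k+1) a b (by rwa [pvSeq_step] at h)
        exact this

theorem loopA_complete : ∀ (fuel k n : Nat) (a b : Int),
    k ≤ n → n + 1 ≤ k + fuel → a = pvSeq n → b = pvSeq (n+1) →
    loopA a b (pvSeq k) (pvSeq (k+1)) (pvSeq (k+2)) fuel = true := by
  intro fuel
  induction fuel with
  | zero => intro k n a b hkn hfuel _ _; omega
  | succ m ih =>
    intro k n a b hkn hfuel ha hb
    rw [loopA]
    split
    · rfl
    · rename_i hne
      have hkn' : k < n := by
        rcases Nat.lt_or_ge k n with h | h
        · exact h
        · exfalso; exact hne ⟨by rw [hb]; congr 1; omega, by rw [ha]; congr 1; omega⟩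
      have hmono : pvSeq (k+1) ≤ pvSeq n := by
        have := Nat.fib_mono (show k+1 ≤ n from hkn')
        simp only [pvSeq]; omega
      rw [if_neg (by rw [ha]; omega)]
      rw [pvSeq_step]
      exact ih (k+1) n a b (by omega) (by omega) ha hb

-- n is small relative to fib n
theorem le_fib_add_four (n : Nat) : n ≤ Nat.fib n + 4 := by
  rcases Nat.lt_or_ge n 5 with h | h
  · omega
  · have := Nat.le_fib_self h; omega

-- the quadratic Fibonacci invariant
theorem fib_quad (n : Nat) :
    (((Nat.fib (n+1) : Int)) * (Nat.fib (n+1)) - (Nat.fib n : Int) * (Nat.fib (n+1)) - (Nat.fib n : Int) * (Nat.fib n)) ^ 2 = 1 := by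
  induction n with
  | zero => decide
  | succ m ih =>
    have hrec : ((Nat.fib (m+2) : Int)) = (Nat.fib (m+1) : Int) + (Nat.fib m : Int) := by
      rw [Nat.fib_add_two]; push_cast; ring
    rw [hrec]
    have : ((Nat.fib (m+1) : Int) + (Nat.fib m : Int)) * ((Nat.fib (m+1) : Int) + (Nat.fib m : Int))
        - (Nat.fib (m+1) : Int) * ((Nat.fib (m+1) : Int) + (Nat.fib m : Int))
        - (Nat.fib (m+1) : Int) * (Nat.fib (m+1) : Int)
        = -(((Nat.fib (m+1) : Int)) * (Nat.fib (m+1)) - (Nat.fib m : Int) * (Nat.fib (m+1)) - (Nat.fib m : Int) * (Nat.fib m)) := by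
      ring
    rw [this, neg_pow, ih]
    norm_num

-- converse: the quadratic identity characterizes consecutive Fibonacci pairs
theorem fib_char : ∀ (m : Nat) (x y : Int), y.toNat ≤ m → 0 ≤ x → x ≤ y →
    (y * y - x * y - x * x) ^ 2 = 1 →
    ∃ n, x = (Nat.fib n : Int) ∧ y = (Nat.fib (n+1) : Int) := by
  intro m
  induction m with
  | zero =>
    intro x y hy hx hxy hq
    have hy0 : y ≤ 0 := by omega
    have hx0 : x = 0 := by omega
    have hyy : y = 0 := by omega
    subst hx0; subst hyy; norm_num at hq
  | succ m ih =>
    intro x y hy hx hxy hq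
    by_cases hx0 : x = 0
    · subst hx0
      have hy1 : y = 1 := by
        rcases lt_or_ge y 1 with h | h
        · have h0 : y = 0 := by omega
          subst h0; norm_num at hq
        · rcases lt_or_ge y 2 with h2 | h2
          · omega
          · exfalso
            have h4 : (4:Int) ≤ y * y := by nlinarith
            nlinarith [hq, h4]
      exact ⟨0, by simp, by simp [hy1]⟩
    · have hx1 : 1 ≤ x := by omega
      by_cases hxy' : x = y
      · subst hxy'
        have : x = 1 := by
          rcases lt_or_ge x 2 with h2 | h2
          · omega
          · exfalso
            have h4 : (4:Int) ≤ x * x := by nlinarith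
            nlinarith [hq, h4]
        exact ⟨1, by simp [this], by simp [this]⟩
      · have hlt : x < y := lt_of_le_of_ne hxy hxy'
        -- show y ≤ 2x, else the quadratic form is too big
        have hle2 : y ≤ 2 * x := by
          by_contra hgt
          push Not at hgt
          have hE : (5:Int) ≤ y * y - x * y - x * x := by
            nlinarith [mul_nonneg (by omega : (0:Int) ≤ y - 2*x - 1) (by omega : (0:Int) ≤ y - 2*x - 1),
                       mul_nonneg (by omega : (0:Int) ≤ y - 2*x - 1) (by omega : (0:Int) ≤ x - 1),
                       mul_nonneg (by omega : (0:Int) ≤ x - 1) (by omega : (0:Int) ≤ x - 1)]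
          nlinarith [hq, hE]
        have hq' : (x * x - (y - x) * x - (y - x) * (y - x)) ^ 2 = 1 := by
          have : x * x - (y - x) * x - (y - x) * (y - x)
              = -(y * y - x * y - x * x) := by ring
          rw [this, neg_pow, hq]; norm_num
        obtain ⟨n, h1, h2⟩ := ih (y - x) x (by omega) (by omega) (by omega) hq'
        exact ⟨n + 1, h2, by rw [Nat.fib_add_two]; push_cast; omega⟩

-- B accepts exactly the consecutive pairs of A's sequence
theorem alt_iff (a b : Int) :
    areTheyInSeq_alt a b = true ↔ ∃ n, a = pvSeq n ∧ b = pvSeq (n+1) := by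
  unfold areTheyInSeq_alt
  simp only [Bool.and_eq_true, decide_eq_true_eq]
  constructor
  · rintro ⟨⟨h1, h2⟩, h3⟩
    obtain ⟨n, hx, hy⟩ := fib_char (b - 1).toNat (a - 1) (b - 1) le_rfl h1 h2 h3
    exact ⟨n, by simp [pvSeq]; omega, by simp [pvSeq]; omega⟩
  · rintro ⟨n, ha, hb⟩
    have hmono := Nat.fib_mono (show n ≤ n + 1 by omega)
    have hq := fib_quad n
    refine ⟨⟨by simp [pvSeq] at ha; omega, by simp [pvSeq] at ha hb; omega⟩, ?_⟩
    have hxa : a - 1 = (Nat.fib n : Int) := by simp [pvSeq] at ha; omega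
    have hyb : b - 1 = (Nat.fib (n+1) : Int) := by simp [pvSeq] at hb; omega
    rw [hxa, hyb]; exact hq

theorem a_iff (a b : Int) :
    areTheyInSeq a b = true ↔ ∃ n, a = pvSeq n ∧ b = pvSeq (n+1) := by
  unfold areTheyInSeq
  constructor
  · intro h
    have h' : loopA a b (pvSeq 0) (pvSeq 1) (pvSeq 2) (a.toNat + 4) = true := by
      simpa [pvSeq] using h
    exact loopA_sound _ 0 a b h'
  · rintro ⟨n, ha, hb⟩
    have hfib : (0:Int) ≤ (Nat.fib n : Int) := by positivity
    have hatn : a.toNat = Nat.fib n + 1 := by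
      simp [pvSeq] at ha; omega
    have hfuel : n + 1 ≤ 0 + (a.toNat + 4) := by
      have := le_fib_add_four n; omega
    have := loopA_complete (a.toNat + 4) 0 n a b (by omega) hfuel ha hb
    simpa [pvSeq] using this

-- ===== VERDICT (by name: the statement is the Claim_ definition above) =====
theorem areTheyInSeq_spec : Claim_equal_areTheyInSeq := by
  intro a b _
  unfold Spec_areTheyInSeq
  rcases h : areTheyInSeq_alt a b with _ | _
  · rcases h2 : areTheyInSeq a b with _ | _
    · rfl
    · exfalso
      have := (a_iff a b).mp h2
      have := (alt_iff a b).mpr this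
      rw [h] at this; exact Bool.false_ne_true this
  · exact (a_iff a b).mpr ((alt_iff a b).mp h)
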